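-- pv_equiv track=rewrite | github.com/scottpeterman/termtelent | termtel/widgets/diff_tool_widget.py | computeLineMapping
-- ===== SOURCE A (Python) =====
-- def computeLineMapping(leftLines, rightLines):
--     """Compute mapping between corresponding lines."""
--     # Basic implementation - in production you'd use a better algorithm
--     leftUsed = [False] * len(leftLines)
--     rightUsed = [False] * len(rightLines)
--     mapping = []
--
--     # Find exact matches
--     for i, leftLine in enumerate(leftLines):
--         for j, rightLine in enumerate(rightLines):
--             if leftLine == rightLine and not leftUsed[i] and not rightUsed[j]:
--                 mapping.append((i, j))
--                 leftUsed[i] = True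
--                 rightUsed[j] = True
--                 break
--
--     # Add unmatched lines
--     for i in range(len(leftLines)):
--         if not leftUsed[i]:
--             mapping.append((i, None))
--
--     for j in range(len(rightLines)):
--         if not rightUsed[j]:
--             mapping.append((None, j))
--
--     # Sort by left index, then right index
--     mapping.sort(key=lambda x: (x[0] if x[0] is not None else float('inf'),
--                                 x[1] if x[1] is not None else float('inf')))
--
--     return mapping
-- ===== SOURCE B (Python) =====
-- def computeLineMapping(leftLines, rightLines):
--     """Compute mapping between corresponding lines."""
--     # Index right lines: content -> ascending list of its positions.
--     occ = {}
--     for j, line in enumerate(rightLines):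
--         occ.setdefault(line, []).append(j)
--     nxt = {}                      # content -> how many of its positions are consumed
--     matched = [False] * len(rightLines)
--     mapping = []
--     # One pass over the left lines, emitted already in left-index order.
--     for i, line in enumerate(leftLines):
--         idxs = occ.get(line, [])
--         k = nxt.get(line, 0)
--         if k < len(idxs):
--             j = idxs[k]
--             nxt[line] = k + 1
--             matched[j] = True
--             mapping.append((i, j))
--         else:
--             mapping.append((i, None))
--     # Remaining right lines, in ascending right-index order.
--     for j in range(len(rightLines)):
--         if not matched[j]:
--             mapping.append((None, j))
--     return mapping
-- ===== Notes on version B (the rewrite author's own statement) =====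
-- stated objective: faster
-- what changed: B replaces A's O(n*m) nested scan plus final key-sort by a one-pass greedy: a dict indexing each right-line content to its ascending positions with a consumed-count pointer, emitting the mapping already in sorted order so no sort is needed.
import Mathlib
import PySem

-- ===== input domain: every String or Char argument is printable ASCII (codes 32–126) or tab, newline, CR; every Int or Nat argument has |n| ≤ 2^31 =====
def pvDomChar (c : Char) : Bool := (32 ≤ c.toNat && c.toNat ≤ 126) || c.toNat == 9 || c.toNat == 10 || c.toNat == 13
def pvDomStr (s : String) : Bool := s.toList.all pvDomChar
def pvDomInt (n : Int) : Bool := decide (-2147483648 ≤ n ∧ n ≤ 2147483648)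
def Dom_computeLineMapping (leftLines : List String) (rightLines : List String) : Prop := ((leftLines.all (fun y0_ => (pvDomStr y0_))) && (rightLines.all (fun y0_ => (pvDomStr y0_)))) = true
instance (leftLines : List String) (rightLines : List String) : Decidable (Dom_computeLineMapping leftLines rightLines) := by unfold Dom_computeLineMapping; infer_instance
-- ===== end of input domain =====

-- B replaces A's O(n·m) nested scan + final sort by a one-pass greedy over a content→positions
-- index that emits the result already in order (objective: faster; return value only, no mutation).

-- ===== PORT A =====
-- Python's float('inf') in the sort key, modeled as the lexicographic pair (1, 0) with an
-- integer v as (0, v): exact, since every int < inf and ints compare normally.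
def pvInf (o : Option Int) : Lex (Int × Int) :=
  match o with
  | none => toLex (1, 0)
  | some v => toLex (0, v)

-- inner `for j, rightLine in enumerate(rightLines): … break` (break = return the updated state).
-- leftUsed[i] / rightUsed[j] are read with getD: i and j are enumerate/range indices, always in range.
def pvAInner (leftLine : String) (i : Nat)
    (mapping : List (Option Int × Option Int)) (leftUsed rightUsed : List Bool) :
    Nat → List String → List (Option Int × Option Int) × List Bool × List Bool
  | _, [] => (mapping, leftUsed, rightUsed)
  | j, rightLine :: rest =>
    if leftLine == rightLine && !(leftUsed.getD i false) && !(rightUsed.getD j false) then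
      (mapping ++ [(some (i : Int), some (j : Int))], leftUsed.set i true, rightUsed.set j true)
    else
      pvAInner leftLine i mapping leftUsed rightUsed (j + 1) rest

-- outer `for i, leftLine in enumerate(leftLines)`
def pvAOuter (rightLines : List String) :
    Nat → List String → List (Option Int × Option Int) × List Bool × List Bool →
    List (Option Int × Option Int) × List Bool × List Bool
  | _, [], st => st
  | i, leftLine :: rest, (mapping, leftUsed, rightUsed) =>
    pvAOuter rightLines (i + 1) rest (pvAInner leftLine i mapping leftUsed rightUsed 0 rightLines)

def computeLineMapping (leftLines : List String) (rightLines : List String) :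
    List (Option Int × Option Int) :=
  let leftUsed := List.replicate leftLines.length false
  let rightUsed := List.replicate rightLines.length false
  let st := pvAOuter rightLines 0 leftLines ([], leftUsed, rightUsed)
  let mapping := st.1
  let leftUsed := st.2.1
  let rightUsed := st.2.2
  -- `for i in range(len(leftLines))` / `for j in range(len(rightLines))` (indices are 0..n-1)
  let mapping := (List.range leftLines.length).foldl
    (fun m i => if leftUsed.getD i false then m else m ++ [(some (i : Int), none)]) mapping
  let mapping := (List.range rightLines.length).foldl
    (fun m j => if rightUsed.getD j false then m else m ++ [(none, some (j : Int))]) mapping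
  -- mapping.sort(key=lambda x: (x[0] or inf, x[1] or inf)) — a 2-tuple key, so sorted2
  PySem.List.sorted2 mapping (fun x => pvInf x.1) (fun x => pvInf x.2) false

-- ===== PORT B =====
-- main `for i, line in enumerate(leftLines)` of Source B
def pvBMain (occ : PySem.Dict String (List Nat)) :
    Nat → List String → PySem.Dict String Nat → List Bool → List (Option Int × Option Int) →
    List (Option Int × Option Int) × List Bool
  | _, [], _, matched, mapping => (mapping, matched)
  | i, line :: rest, nxt, matched, mapping =>
    let idxs := occ.getD line []
    let k := nxt.getD line 0
    if k < idxs.length then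
      let j := idxs.getD k 0
      pvBMain occ (i + 1) rest (nxt.insert line (k + 1)) (matched.set j true)
        (mapping ++ [(some (i : Int), some (j : Int))])
    else
      pvBMain occ (i + 1) rest nxt matched (mapping ++ [(some (i : Int), none)])

def computeLineMapping_alt (leftLines : List String) (rightLines : List String) :
    List (Option Int × Option Int) :=
  -- `occ.setdefault(line, []).append(j)` over enumerate(rightLines)
  let occ := (rightLines.zipIdx).foldl (fun d p => d.modify p.1 [] (fun v => v ++ [p.2]))
    PySem.Dict.empty
  let st := pvBMain occ 0 leftLines PySem.Dict.empty (List.replicate rightLines.length false) []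
  let mapping := st.1
  let matched := st.2
  (List.range rightLines.length).foldl
    (fun m j => if matched.getD j false then m else m ++ [(none, some (j : Int))]) mapping

-- ===== PRECONDITION & SPEC =====
def Spec_computeLineMapping (leftLines : List String) (rightLines : List String) (out : List (Option Int × Option Int)) : Prop := out = computeLineMapping_alt leftLines rightLines
instance (leftLines : List String) (rightLines : List String) (out : List (Option Int × Option Int)) : Decidable (Spec_computeLineMapping leftLines rightLines out) := by unfold Spec_computeLineMapping; infer_instance

-- ===== CLAIM (what is proved, stated in full; the proofs are below) =====
def Claim_equal_computeLineMapping : Prop := ∀ (leftLines : List String) (rightLines : List String), Dom_computeLineMapping leftLines rightLines → Spec_computeLineMapping leftLines rightLines (computeLineMapping leftLines rightLines)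

-- ===== LEMMAS AND PROOFS =====

-- Both sides implement the same greedy choice: for each left line in order, the smallest
-- still-unused right index with equal content.  `pvMid` is that common abstract loop,
-- `pvFF` the choice function, `pvOcc` the ascending occurrence positions of a content,
-- `pvInv` the B-loop invariant (matched marks exactly the first nxt[c] occurrences of c).

def pvFF (line : String) (used : List Bool) : Nat → List String → Option Nat
  | _, [] => none
  | j, r :: rest =>
    if line == r && !(used.getD j false) then some j else pvFF line used (j + 1) rest

def pvMid (right : List String) : Nat → List String → List Bool →
    List (Option Int × Option Int) × List Bool
  | _, [], used => ([], used)
  | i, l :: rest, used =>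
    match pvFF l used 0 right with
    | some j =>
      let r := pvMid right (i + 1) rest (used.set j true)
      ((some (i : Int), some (j : Int)) :: r.1, r.2)
    | none =>
      let r := pvMid right (i + 1) rest used
      ((some (i : Int), none) :: r.1, r.2)

def pvOcc (c : String) : Nat → List String → List Nat
  | _, [] => []
  | j, r :: rest => if r == c then j :: pvOcc c (j + 1) rest else pvOcc c (j + 1) rest

def pvInv (right : List String) (nxt : PySem.Dict String Nat) (matched : List Bool) : Prop :=
  matched.length = right.length ∧
  ∀ c, nxt.getD c 0 ≤ (pvOcc c 0 right).length ∧
    ∀ t, t < (pvOcc c 0 right).length →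
      matched.getD ((pvOcc c 0 right).getD t 0) false = decide (t < nxt.getD c 0)

lemma pv_getD_set (xs : List Bool) (i k : Nat) (v : Bool) :
    (xs.set i v).getD k false = if i = k ∧ i < xs.length then v else xs.getD k false := by
  simp only [List.getD_eq_getElem?_getD, List.getElem?_set]
  by_cases h : i = k
  · subst h
    by_cases h2 : i < xs.length
    · simp [h2]
    · simp [h2]
  · simp [h]

lemma pv_getD_replicate (n k : Nat) : (List.replicate n false).getD k false = false := by
  simp only [List.getD_eq_getElem?_getD, List.getElem?_replicate]
  split_ifs <;> simp

lemma pvAInner_eq (l : String) (i : Nat) (m : List (Option Int × Option Int))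
    (lu ru : List Bool) (h : lu.getD i false = false) :
    ∀ (rs : List String) (j : Nat),
    pvAInner l i m lu ru j rs =
      match pvFF l ru j rs with
      | some j' => (m ++ [(some (i : Int), some (j' : Int))], lu.set i true, ru.set j' true)
      | none => (m, lu, ru) := by
  intro rs
  induction rs with
  | nil => intro j; simp [pvAInner, pvFF]
  | cons r rest ih =>
    intro j
    simp only [pvAInner, pvFF, h, Bool.not_false, Bool.and_true]
    by_cases hc : l = r ∧ ru[j]?.getD false = false
    · simp [hc]
    · simp [hc, ih]

lemma pvAOuter_eq (right : List String) :
    ∀ (ls : List String) (i : Nat) (m : List (Option Int × Option Int)) (lu ru : List Bool),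
    (∀ k, i ≤ k → lu.getD k false = false) →
    i + ls.length ≤ lu.length →
    (pvAOuter right i ls (m, lu, ru)).1
        = m ++ (pvMid right i ls ru).1.filter (fun p => p.2.isSome)
    ∧ (pvAOuter right i ls (m, lu, ru)).2.2 = (pvMid right i ls ru).2
    ∧ (∀ k, (k < i ∨ i + ls.length ≤ k) →
        (pvAOuter right i ls (m, lu, ru)).2.1.getD k false = lu.getD k false)
    ∧ (∀ t, t < ls.length →
        (pvAOuter right i ls (m, lu, ru)).2.1.getD (i + t) false
          = ((pvMid right i ls ru).1.getD t (none, none)).2.isSome) := by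
  intro ls
  induction ls with
  | nil =>
    intro i m lu ru h hlen
    refine ⟨by simp [pvAOuter, pvMid], by simp [pvAOuter, pvMid], ?_, ?_⟩
    · intro k _; simp [pvAOuter]
    · intro t ht; simp at ht
  | cons l rest ih =>
    intro i m lu ru h hlen
    have hlenc : i + rest.length + 1 ≤ lu.length := by
      simpa [Nat.add_comm, Nat.add_assoc, Nat.add_left_comm] using hlen
    have hi : lu.getD i false = false := h i (le_refl i)
    have hilen : i < lu.length := by omega
    simp only [pvAOuter, pvAInner_eq l i m lu ru hi right 0]
    cases hff : pvFF l ru 0 right with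
    | some j =>
      have hlu' : ∀ k, i + 1 ≤ k → (lu.set i true).getD k false = false := by
        intro k hk; rw [pv_getD_set]
        have : ¬ (i = k ∧ i < lu.length) := by omega
        rw [if_neg this]; exact h k (by omega)
      have hlen' : (i + 1) + rest.length ≤ (lu.set i true).length := by
        simp [List.length_set]; omega
      obtain ⟨ih1, ih2, ih3, ih4⟩ := ih (i + 1) (m ++ [(some (i : Int), some (j : Int))])
        (lu.set i true) (ru.set j true) hlu' hlen'
      simp only [pvMid, hff]
      refine ⟨?_, ih2, ?_, ?_⟩
      · rw [ih1]; simp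
      · intro k hk
        have hk' : k < i + 1 ∨ i + 1 + rest.length ≤ k := by
          rcases hk with hk | hk
          · exact Or.inl (by omega)
          · exact Or.inr (by simp at hk; omega)
        rw [ih3 k hk', pv_getD_set]
        have : ¬ (i = k ∧ i < lu.length) := by
          rcases hk with hk | hk
          · omega
          · simp at hk; omega
        simp [this]
      · intro t ht
        cases t with
        | zero =>
          have h3 := ih3 i (Or.inl (by omega))
          simp only [Nat.add_zero]
          rw [h3, pv_getD_set]
          simp [hilen]
        | succ t' =>
          have he : i + (t' + 1) = (i + 1) + t' := by omega
          rw [he, ih4 t' (by simp at ht; omega)]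
          simp
    | none =>
      have hlu' : ∀ k, i + 1 ≤ k → lu.getD k false = false := fun k hk => h k (by omega)
      obtain ⟨ih1, ih2, ih3, ih4⟩ := ih (i + 1) m lu ru hlu' (by omega)
      simp only [pvMid, hff]
      refine ⟨?_, ih2, ?_, ?_⟩
      · rw [ih1]; simp
      · intro k hk
        refine ih3 k ?_
        rcases hk with hk | hk
        · exact Or.inl (by omega)
        · exact Or.inr (by simp at hk; omega)
      · intro t ht
        cases t with
        | zero =>
          have h3 := ih3 i (Or.inl (by omega))
          simp only [Nat.add_zero]
          rw [h3, hi]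
          simp
        | succ t' =>
          have he : i + (t' + 1) = (i + 1) + t' := by omega
          rw [he, ih4 t' (by simp at ht; omega)]
          simp

lemma pvMid_shape (right : List String) :
    ∀ (ls : List String) (i : Nat) (used : List Bool),
    (pvMid right i ls used).1.length = ls.length
    ∧ ∀ t, t < ls.length →
        ((pvMid right i ls used).1.getD t (none, none)).1 = some ((i + t : Nat) : Int) := by
  intro ls
  induction ls with
  | nil => intro i used; exact ⟨by simp [pvMid], by intro t ht; simp at ht⟩
  | cons l rest ih =>
    intro i used
    simp only [pvMid]
    cases hff : pvFF l used 0 right with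
    | some j =>
      obtain ⟨ih1, ih2⟩ := ih (i + 1) (used.set j true)
      refine ⟨by simp [ih1], ?_⟩
      intro t ht
      cases t with
      | zero => simp
      | succ t' =>
        have he : i + (t' + 1) = (i + 1) + t' := by omega
        simp only [List.getD_cons_succ, he]
        exact ih2 t' (by simp at ht; omega)
    | none =>
      obtain ⟨ih1, ih2⟩ := ih (i + 1) used
      refine ⟨by simp [ih1], ?_⟩
      intro t ht
      cases t with
      | zero => simp
      | succ t' =>
        have he : i + (t' + 1) = (i + 1) + t' := by omega
        simp only [List.getD_cons_succ, he]
        exact ih2 t' (by simp at ht; omega)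

lemma pvRangeFilter (luF : List Bool) :
    ∀ (ps : List (Option Int × Option Int)) (a : Nat),
    (∀ t, t < ps.length → (ps.getD t (none, none)).1 = some ((a + t : Nat) : Int)) →
    (∀ t, t < ps.length → luF.getD (a + t) false = (ps.getD t (none, none)).2.isSome) →
    ((List.range' a ps.length).filter (fun t => !luF.getD t false)).map
        (fun (t : Nat) => ((some (t : Int), none) : Option Int × Option Int))
      = ps.filter (fun p => !p.2.isSome) := by
  intro ps
  induction ps with
  | nil => intro a _ _; simp
  | cons p ps' ih =>
    intro a h1 h2
    have hp1 : p.1 = some (a : Int) := by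
      have := h1 0 (by simp)
      simpa using this
    have hp2 : luF.getD a false = p.2.isSome := by
      have := h2 0 (by simp)
      simpa using this
    have h1' : ∀ t, t < ps'.length →
        (ps'.getD t (none, none)).1 = some ((a + 1 + t : Nat) : Int) := by
      intro t ht
      have := h1 (t + 1) (by simp; omega)
      simp only [List.getD_cons_succ] at this
      rw [this]
      congr 1
      omega
    have h2' : ∀ t, t < ps'.length →
        luF.getD (a + 1 + t) false = (ps'.getD t (none, none)).2.isSome := by
      intro t ht
      have := h2 (t + 1) (by simp; omega)
      simp only [List.getD_cons_succ] at this
      rw [← this]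
      congr 1
      omega
    cases hsp : p.2.isSome with
    | true =>
      rw [hsp] at hp2
      simp only [List.length_cons, List.range'_succ, List.filter_cons, hp2, hsp, Bool.not_true]
      simp only [Bool.false_eq_true, if_false]
      simpa using ih (a + 1) h1' h2'
    | false =>
      rw [hsp] at hp2
      have hpnone : p.2 = none := Option.not_isSome_iff_eq_none.mp (by simp [hsp])
      have hpeq : p = (some (a : Int), none) := by
        cases p with
        | mk x y => simp at hp1 hpnone; simp [hp1, hpnone]
      simp only [List.length_cons, List.range'_succ, List.filter_cons, hp2, hsp, Bool.not_false]
      simp only [if_true, List.map_cons]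
      rw [hpeq]
      simpa using ih (a + 1) h1' h2'

lemma pv_foldl_flip (uF : List Bool) (f : Nat → Option Int × Option Int)
    (l : List Nat) (acc : List (Option Int × Option Int)) :
    l.foldl (fun m j => if uF.getD j false then m else m ++ [f j]) acc
      = acc ++ (l.filter (fun j => !uF.getD j false)).map f := by
  have : (fun (m : List (Option Int × Option Int)) j =>
      if uF.getD j false then m else m ++ [f j])
      = (fun m j => if !uF.getD j false then m ++ [f j] else m) := by
    funext m j
    cases h : uF.getD j false <;> simp [h]
  rw [this, PySem.List.foldl_append_if]

lemma pv_sorted2_eq_sorted (xs : List (Option Int × Option Int)) :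
    PySem.List.sorted2 xs (fun x => pvInf x.1) (fun x => pvInf x.2) false
      = PySem.List.sorted xs (fun x => toLex (pvInf x.1, pvInf x.2)) false := by
  rw [PySem.List.sorted_eq_foldl_insertBy]
  unfold PySem.List.sorted2
  simp only []
  congr 1
  funext acc x
  congr 1
  funext a b
  rcases lt_trichotomy (pvInf a.1) (pvInf b.1) with h | h | h
  · simp [h, Prod.Lex.lt_iff, asymm h]
  · simp [h, Prod.Lex.lt_iff]
  · simp [Prod.Lex.lt_iff, h, asymm h]
    intro he
    exact absurd he.symm (ne_of_lt h)

lemma pvOcc_zipIdx (c : String) :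
    ∀ (rs : List String) (j : Nat),
    ((rs.zipIdx j).filter (fun p => p.1 == c)).map (fun x => x.2) = pvOcc c j rs := by
  intro rs
  induction rs with
  | nil => intro j; simp [pvOcc]
  | cons r rest ih =>
    intro j
    simp only [List.zipIdx_cons, List.filter_cons, pvOcc]
    by_cases h : r = c
    · simp [h, ih]
    · simp [h, ih]

lemma pvOcc_mem (c : String) :
    ∀ (rs : List String) (j x : Nat), x ∈ pvOcc c j rs →
      j ≤ x ∧ x - j < rs.length ∧ rs.getD (x - j) "" = c := by
  intro rs
  induction rs with
  | nil => intro j x hx; simp [pvOcc] at hx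
  | cons r rest ih =>
    intro j x hx
    simp only [pvOcc] at hx
    by_cases h : r = c
    · simp only [h, beq_self_eq_true, if_true, List.mem_cons] at hx
      rcases hx with rfl | hx
      · refine ⟨le_refl x, by simp, by simp [h]⟩
      · obtain ⟨h1, h2, h3⟩ := ih (j + 1) x hx
        refine ⟨by omega, by rw [List.length_cons]; omega, ?_⟩
        have he : x - j = (x - (j + 1)) + 1 := by omega
        rw [he, List.getD_cons_succ]
        exact h3
    · have hb : (r == c) = false := by simp [h]
      simp only [hb, Bool.false_eq_true, if_false] at hx
      obtain ⟨h1, h2, h3⟩ := ih (j + 1) x hx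
      refine ⟨by omega, by rw [List.length_cons]; omega, ?_⟩
      have he : x - j = (x - (j + 1)) + 1 := by omega
      rw [he, List.getD_cons_succ]
      exact h3

lemma pvOcc_pairwise (c : String) :
    ∀ (rs : List String) (j : Nat), (pvOcc c j rs).Pairwise (· < ·) := by
  intro rs
  induction rs with
  | nil => intro j; simp [pvOcc]
  | cons r rest ih =>
    intro j
    simp only [pvOcc]
    by_cases h : r = c
    · simp only [h, beq_self_eq_true, if_true]
      refine List.Pairwise.cons ?_ (ih (j + 1))
      intro x hx
      exact lt_of_lt_of_le (by omega) (pvOcc_mem c rest (j + 1) x hx).1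
    · have hb : (r == c) = false := by simp [h]
      simp only [hb, Bool.false_eq_true, if_false]
      exact ih (j + 1)

lemma pvFF_eq_head (l : String) (used : List Bool) :
    ∀ (rs : List String) (j : Nat),
    pvFF l used j rs = ((pvOcc l j rs).filter (fun x => !used.getD x false)).head? := by
  intro rs
  induction rs with
  | nil => intro j; simp [pvFF, pvOcc]
  | cons r rest ih =>
    intro j
    simp only [pvFF, pvOcc]
    by_cases h : l = r
    · subst h
      simp only [beq_self_eq_true, Bool.true_and, if_true, List.filter_cons]
      cases hu : used.getD j false with
      | false =>
        simp only [hu, Bool.not_false, if_true, List.head?_cons]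
      | true =>
        simp only [hu, Bool.not_true, Bool.false_eq_true, if_false]
        exact ih (j + 1)
    · have h1 : (l == r) = false := by simp [h]
      have h2 : (r == l) = false := by simp [Ne.symm h]
      simp only [h1, h2, Bool.false_and, Bool.false_eq_true, if_false]
      exact ih (j + 1)

lemma pv_filter_eq_drop (p : Nat → Bool) :
    ∀ (xs : List Nat) (k : Nat),
    (∀ t, (ht : t < xs.length) → p (xs.getD t 0) = decide (k ≤ t)) →
    xs.filter p = xs.drop k := by
  intro xs
  induction xs with
  | nil => intro k _; simp
  | cons x xs' ih =>
    intro k h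
    cases k with
    | zero =>
      have hx : p x = true := by simpa using h 0 (by simp)
      simp only [List.filter_cons, hx, if_true, List.drop_zero]
      rw [ih 0 (fun t ht => by simpa using h (t + 1) (by simp; omega))]
      simp
    | succ k' =>
      have hx : p x = false := by simpa using h 0 (by simp)
      simp only [List.filter_cons, hx, List.drop_succ_cons]
      simp only [Bool.false_eq_true, if_false]
      exact ih k' (fun t ht => by simpa using h (t + 1) (by simp; omega))

lemma pvFF_of_inv (right : List String) (nxt : PySem.Dict String Nat) (matched : List Bool)
    (hinv : pvInv right nxt matched) (l : String) :
    pvFF l matched 0 right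
      = if nxt.getD l 0 < (pvOcc l 0 right).length
        then some ((pvOcc l 0 right).getD (nxt.getD l 0) 0) else none := by
  rw [pvFF_eq_head l matched right 0]
  rw [pv_filter_eq_drop _ (pvOcc l 0 right) (nxt.getD l 0) ?hp]
  · rw [List.head?_drop]
    by_cases hk : nxt.getD l 0 < (pvOcc l 0 right).length
    · rw [if_pos hk, List.getElem?_eq_getElem hk, List.getD_eq_getElem _ _ hk]
    · rw [if_neg hk, List.getElem?_eq_none (by omega)]
  case hp =>
    intro t ht
    rw [(hinv.2 l).2 t ht]
    by_cases h : t < nxt.getD l 0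
    · simp [h]
    · simp [h]; omega

lemma pvInv_step (right : List String) (nxt : PySem.Dict String Nat) (matched : List Bool)
    (hinv : pvInv right nxt matched) (l : String)
    (hk : nxt.getD l 0 < (pvOcc l 0 right).length) :
    pvInv right (nxt.insert l (nxt.getD l 0 + 1))
      (matched.set ((pvOcc l 0 right).getD (nxt.getD l 0) 0) true) := by
  obtain ⟨hlen, hinv2⟩ := hinv
  have hjmem : (pvOcc l 0 right).getD (nxt.getD l 0) 0 ∈ pvOcc l 0 right := by
    rw [List.getD_eq_getElem _ _ hk]; exact List.getElem_mem _
  have hjprop := pvOcc_mem l right 0 _ hjmem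
  have hjlt : (pvOcc l 0 right).getD (nxt.getD l 0) 0 < right.length := by
    have := hjprop.2.1; omega
  have hjc : right.getD ((pvOcc l 0 right).getD (nxt.getD l 0) 0) "" = l := by
    have := hjprop.2.2; simpa using this
  constructor
  · simp [List.length_set, hlen]
  · intro c
    by_cases hc : c = l
    · subst hc
      constructor
      · rw [PySem.Dict.getD_insert, if_pos rfl]; omega
      · intro t ht
        rw [PySem.Dict.getD_insert, if_pos rfl, pv_getD_set]
        by_cases htk : t = nxt.getD c 0
        · subst htk
          rw [if_pos ⟨rfl, by omega⟩]
          simp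
        · have hpw := (pvOcc_pairwise c right 0)
          rw [List.pairwise_iff_getElem] at hpw
          have hne : (pvOcc c 0 right).getD (nxt.getD c 0) 0 ≠ (pvOcc c 0 right).getD t 0 := by
            rw [List.getD_eq_getElem _ _ hk, List.getD_eq_getElem _ _ ht]
            rcases Nat.lt_or_ge t (nxt.getD c 0) with hlt | hge
            · exact ne_of_gt (hpw t (nxt.getD c 0) ht hk hlt)
            · exact ne_of_lt (hpw (nxt.getD c 0) t hk ht (by omega))
          rw [if_neg (by intro hand; exact hne hand.1)]
          rw [(hinv2 c).2 t ht]
          by_cases h : t < nxt.getD c 0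
          · simp [h]; omega
          · simp [h]; omega
    · constructor
      · rw [PySem.Dict.getD_insert, if_neg hc]; exact (hinv2 c).1
      · intro t ht
        rw [PySem.Dict.getD_insert, if_neg hc, pv_getD_set]
        have htmem : (pvOcc c 0 right).getD t 0 ∈ pvOcc c 0 right := by
          rw [List.getD_eq_getElem _ _ ht]; exact List.getElem_mem _
        have htc : right.getD ((pvOcc c 0 right).getD t 0) "" = c := by
          have := (pvOcc_mem c right 0 _ htmem).2.2; simpa using this
        have hne : (pvOcc l 0 right).getD (nxt.getD l 0) 0 ≠ (pvOcc c 0 right).getD t 0 := by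
          intro he
          rw [he] at hjc
          exact hc (htc ▸ hjc)
        rw [if_neg (by intro hand; exact hne hand.1)]
        exact (hinv2 c).2 t ht

lemma pvBMain_eq (right : List String) (occ : PySem.Dict String (List Nat))
    (hocc : ∀ c, occ.getD c [] = pvOcc c 0 right) :
    ∀ (ls : List String) (i : Nat) (nxt : PySem.Dict String Nat) (matched : List Bool)
      (mapping : List (Option Int × Option Int)),
    pvInv right nxt matched →
    pvBMain occ i ls nxt matched mapping
      = (mapping ++ (pvMid right i ls matched).1, (pvMid right i ls matched).2) := by
  intro ls
  induction ls with
  | nil => intro i nxt matched mapping hinv; simp [pvBMain, pvMid]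
  | cons l rest ih =>
    intro i nxt matched mapping hinv
    have hff := pvFF_of_inv right nxt matched hinv l
    simp only [pvBMain, hocc l]
    by_cases hk : nxt.getD l 0 < (pvOcc l 0 right).length
    · rw [if_pos hk] at hff
      rw [if_pos hk]
      simp only [pvMid, hff]
      rw [ih (i + 1) _ _ _ (pvInv_step right nxt matched hinv l hk)]
      simp
    · rw [if_neg hk] at hff
      rw [if_neg hk]
      simp only [pvMid, hff]
      rw [ih (i + 1) nxt matched _ hinv]
      simp

lemma pv_key_some_lt_some {v w : Int} (h : v < w) : pvInf (some v) < pvInf (some w) := by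
  simp [pvInf, Prod.Lex.lt_iff, h]

lemma pv_key_some_lt_none (v : Int) : pvInf (some v) < pvInf none := by
  simp [pvInf, Prod.Lex.lt_iff]

lemma pvInv_init (R : List String) :
    pvInv R PySem.Dict.empty (List.replicate R.length false) := by
  refine ⟨by simp, ?_⟩
  intro c
  refine ⟨by simp [PySem.Dict.getD_empty], ?_⟩
  intro t ht
  rw [pv_getD_replicate]
  simp [PySem.Dict.getD_empty]

-- ===== VERDICT (by name: the statement is the Claim_ definition above) =====
theorem computeLineMapping_spec : Claim_equal_computeLineMapping := by
  intro L R _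
  unfold Spec_computeLineMapping
  unfold computeLineMapping computeLineMapping_alt
  dsimp only
  have hocc : ∀ c, ((R.zipIdx).foldl (fun d p => d.modify p.1 [] (fun v => v ++ [p.2]))
      PySem.Dict.empty).getD c [] = pvOcc c 0 R := by
    intro c
    rw [PySem.Dict.getD_foldl_modify_append]
    simp [PySem.Dict.getD_empty, pvOcc_zipIdx]
  have hB := pvBMain_eq R _ hocc L 0 PySem.Dict.empty (List.replicate R.length false) []
    (pvInv_init R)
  obtain ⟨hA1, hA2, hA3, hA4⟩ := pvAOuter_eq R L 0 [] (List.replicate L.length false)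
    (List.replicate R.length false) (fun k _ => pv_getD_replicate _ _) (by simp)
  obtain ⟨hS1, hS2⟩ := pvMid_shape R L 0 (List.replicate R.length false)
  set P := pvMid R 0 L (List.replicate R.length false) with hP
  set stA := pvAOuter R 0 L ([], List.replicate L.length false, List.replicate R.length false)
    with hstA
  -- rewrite both sides
  rw [hB]
  simp only [List.nil_append]
  rw [pv_foldl_flip, pv_foldl_flip, pv_foldl_flip]
  rw [hA1, hA2]
  simp only [List.nil_append]
  -- the unmatched-left block is P.1's unmatched half
  have hNL : ((List.range L.length).filter (fun t => !stA.2.1.getD t false)).map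
      (fun (t : Nat) => ((some (t : Int), none) : Option Int × Option Int))
      = P.1.filter (fun p => !p.2.isSome) := by
    rw [List.range_eq_range', show L.length = P.1.length from hS1.symm]
    refine pvRangeFilter stA.2.1 P.1 0 ?_ ?_
    · intro t ht; exact hS2 t (hS1 ▸ ht)
    · intro t ht; exact hA4 t (hS1 ▸ ht)
  rw [hNL]
  rw [pv_sorted2_eq_sorted]
  have hfst : ∀ t, (ht : t < P.1.length) → (P.1[t]).1 = some (t : Int) := by
    intro t ht
    have := hS2 t (hS1 ▸ ht)
    rw [List.getD_eq_getElem _ _ ht] at this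
    simpa using this
  apply PySem.List.sorted_eq_of_perm_of_pairwise_lt
  · exact ((List.filter_append_perm (fun p => p.2.isSome) P.1).symm).append_right _
  · rw [List.pairwise_append]
    refine ⟨?_, ?_, ?_⟩
    · rw [List.pairwise_iff_getElem]
      intro t t' h1 h2 hlt
      refine Prod.Lex.lt_iff.mpr (Or.inl ?_)
      show pvInf (P.1[t]).1 < pvInf (P.1[t']).1
      rw [hfst t h1, hfst t' h2]
      exact pv_key_some_lt_some (by exact_mod_cast hlt)
    · rw [List.pairwise_map]
      refine List.Pairwise.imp ?_ ((List.pairwise_lt_range).filter _)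
      intro a b h
      exact Prod.Lex.lt_iff.mpr (Or.inr ⟨rfl, pv_key_some_lt_some (by exact_mod_cast h)⟩)
    · intro a ha b hb
      obtain ⟨t, ht, rfl⟩ := List.mem_iff_getElem.mp ha
      obtain ⟨j, hj, rfl⟩ := List.mem_map.mp hb
      refine Prod.Lex.lt_iff.mpr (Or.inl ?_)
      show pvInf (P.1[t]).1 < pvInf (none : Option Int)
      rw [hfst t ht]
      exact pv_key_some_lt_none _
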